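-- pv_equiv track=rewrite | github.com/xlykoi/Szamitogepes-halozatok | structures/skeleton.py | _env_to_console_matrix
-- ===== SOURCE A (Python) =====
-- from typing import Set, Tuple, List, Optional, Dict
--
-- Pos = Tuple[int, int]
--
-- def _env_to_console_matrix(positions: Set[Pos]) -> List[List[str]]:
--     if not positions:
--         return [["0"]]
--     min_x = min(x for x, _ in positions)
--     max_x = max(x for x, _ in positions)
--     min_y = min(y for _, y in positions)
--     max_y = max(y for _, y in positions)
--     w = max_x - min_x + 1
--     h = max_y - min_y + 1
--     grid = [["0" for _ in range(w)] for _ in range(h)]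
--     for x, y in positions:
--         gx = x - min_x
--         gy = max_y - y
--         grid[gy][gx] = "1"
--     return grid
-- ===== SOURCE B (Python) =====
-- from typing import Set, Tuple, List
--
-- Pos = Tuple[int, int]
--
-- def _env_to_console_matrix(positions: Set[Pos]) -> List[List[str]]:
--     if not positions:
--         return [["0"]]
--     it = iter(positions)
--     x0, y0 = next(it)
--     min_x = max_x = x0
--     min_y = max_y = y0
--     for x, y in it:
--         if x < min_x:
--             min_x = x
--         if x > max_x:
--             max_x = x
--         if y < min_y:
--             min_y = y
--         if y > max_y:
--             max_y = y
--     return [["1" if (min_x + gx, max_y - gy) in positions else "0"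
--              for gx in range(max_x - min_x + 1)]
--             for gy in range(max_y - min_y + 1)]
-- ===== Notes on version B (the rewrite author's own statement) =====
-- stated objective: alternative
-- what changed: B computes all four extrema in a single pass over the set and builds the grid directly by comprehension with an O(1) set-membership test per cell, instead of A's four separate min/max scans followed by allocating an all-'0' grid and mutating cells in a fill loop.
import Mathlib
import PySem

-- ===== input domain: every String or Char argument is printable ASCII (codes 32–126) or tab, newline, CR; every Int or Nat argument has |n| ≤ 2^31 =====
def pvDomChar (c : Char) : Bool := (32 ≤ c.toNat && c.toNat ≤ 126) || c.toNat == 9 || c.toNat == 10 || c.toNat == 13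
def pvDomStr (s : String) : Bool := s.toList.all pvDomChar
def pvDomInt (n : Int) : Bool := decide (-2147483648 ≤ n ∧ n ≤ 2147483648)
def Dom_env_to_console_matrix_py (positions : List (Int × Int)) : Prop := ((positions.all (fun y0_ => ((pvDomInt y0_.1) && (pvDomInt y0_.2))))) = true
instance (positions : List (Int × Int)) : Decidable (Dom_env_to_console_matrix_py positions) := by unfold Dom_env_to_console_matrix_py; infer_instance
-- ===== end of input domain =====

-- B computes all four extrema in one pass and builds the grid by comprehension with a
-- per-cell membership test, instead of A's four min/max scans plus a mutating fill loop
-- (objective: alternative decomposition, same asymptotic cost).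

-- ===== PORT A =====
def pvFillStep (min_x max_y : Int) (g : List (List String)) (p : Int × Int) : List (List String) :=
  let gx := p.1 - min_x
  let gy := max_y - p.2
  g.set gy.toNat ((g[gy.toNat]?.getD []).set gx.toNat "1")

def env_to_console_matrix_py (positions : List (Int × Int)) : List (List String) :=
  if positions = [] then [["0"]]
  else
    let min_x := (PySem.List.min? (positions.map (fun q => q.1)) (fun v => v)).getD 0
    let max_x := (PySem.List.max? (positions.map (fun q => q.1)) (fun v => v)).getD 0
    let min_y := (PySem.List.min? (positions.map (fun q => q.2)) (fun v => v)).getD 0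
    let max_y := (PySem.List.max? (positions.map (fun q => q.2)) (fun v => v)).getD 0
    let w := max_x - min_x + 1
    let h := max_y - min_y + 1
    let grid := (List.range h.toNat).map (fun _ => (List.range w.toNat).map (fun _ => "0"))
    positions.foldl (pvFillStep min_x max_y) grid

def pvExtrema (first : Int × Int) (rest : List (Int × Int)) : Int × Int × Int × Int :=
  rest.foldl (fun a q => (min a.1 q.1, max a.2.1 q.1, min a.2.2.1 q.2, max a.2.2.2 q.2))
    (first.1, first.1, first.2, first.2)

def env_to_console_matrix_py_alt (positions : List (Int × Int)) : List (List String) :=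
  match positions with
  | [] => [["0"]]
  | p :: rest =>
    let e := pvExtrema p rest
    (List.range (e.2.2.2 - e.2.2.1 + 1).toNat).map (fun (gy : Nat) =>
      (List.range (e.2.1 - e.1 + 1).toNat).map (fun (gx : Nat) =>
        if (e.1 + (gx : Int), e.2.2.2 - (gy : Int)) ∈ p :: rest then "1" else "0"))


-- ===== PRECONDITION & SPEC =====
def Spec_env_to_console_matrix_py (positions : List (Int × Int)) (out : List (List String)) : Prop := out = env_to_console_matrix_py_alt positions
instance (positions : List (Int × Int)) (out : List (List String)) : Decidable (Spec_env_to_console_matrix_py positions out) := by unfold Spec_env_to_console_matrix_py; infer_instance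

-- ===== CLAIM (what is proved, stated in full; the proofs are below) =====
def Claim_equal_env_to_console_matrix_py : Prop := ∀ (positions : List (Int × Int)), Dom_env_to_console_matrix_py positions → Spec_env_to_console_matrix_py positions (env_to_console_matrix_py positions)

-- ===== LEMMAS AND PROOFS =====

lemma pvExtrema_eq_aux (rest : List (Int × Int)) : ∀ (a b c d : Int),
    rest.foldl (fun a q => (min a.1 q.1, max a.2.1 q.1, min a.2.2.1 q.2, max a.2.2.2 q.2)) (a, b, c, d)
      = ((rest.map (fun q => q.1)).foldl min a, (rest.map (fun q => q.1)).foldl max b,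
         (rest.map (fun q => q.2)).foldl min c, (rest.map (fun q => q.2)).foldl max d) := by
  induction rest with
  | nil => intro a b c d; simp
  | cons p t ih => intro a b c d; simp [List.foldl_cons, ih]


lemma pvFillStep_shape (m M : Int) (h w : Nat) (g : List (List String)) (p : Int × Int)
    (hg : g.length = h) (hr : ∀ r ∈ g, r.length = w) :
    (pvFillStep m M g p).length = h ∧ ∀ r ∈ pvFillStep m M g p, r.length = w := by
  simp only [pvFillStep]
  by_cases hlt : (M - p.2).toNat < g.length
  · refine ⟨by simp [hg], ?_⟩
    intro r hr'
    rcases List.mem_or_eq_of_mem_set hr' with h1 | h2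
    · exact hr r h1
    · subst h2
      rw [List.length_set, List.getElem?_eq_getElem hlt, Option.getD_some]
      exact hr _ (List.getElem_mem hlt)
  · rw [List.set_eq_of_length_le (Nat.le_of_not_lt hlt)]
    exact ⟨hg, hr⟩

lemma pv_fill_shape (m M : Int) (h w : Nat) (l : List (Int × Int)) :
    ∀ (g : List (List String)), g.length = h → (∀ r ∈ g, r.length = w) →
      (l.foldl (pvFillStep m M) g).length = h ∧ ∀ r ∈ l.foldl (pvFillStep m M) g, r.length = w := by
  induction l with
  | nil => intro g hg hr; exact ⟨hg, hr⟩
  | cons p t ih =>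
    intro g hg hr
    rw [List.foldl_cons]
    obtain ⟨h1, h2⟩ := pvFillStep_shape m M h w g p hg hr
    exact ih _ h1 h2

lemma pv_fill_cell (m M : Int) (h w : Nat) (l : List (Int × Int)) :
    ∀ (g : List (List String)), g.length = h → (∀ r ∈ g, r.length = w) →
      (∀ p ∈ l, (M - p.2).toNat < h ∧ (p.1 - m).toNat < w) →
      ∀ i j : Nat,
        ((l.foldl (pvFillStep m M) g)[i]?.getD [])[j]? =
          if ∃ p ∈ l, (M - p.2).toNat = i ∧ (p.1 - m).toNat = j then some "1"
          else (g[i]?.getD [])[j]? := by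
  induction l with
  | nil => intro g _ _ _ i j; simp
  | cons p t ih =>
    intro g hg hr hb i j
    rw [List.foldl_cons]
    obtain ⟨hby, hbx⟩ := hb p (List.mem_cons_self)
    obtain ⟨h1, h2⟩ := pvFillStep_shape m M h w g p hg hr
    rw [ih _ h1 h2 (fun q hq => hb q (List.mem_cons_of_mem _ hq)) i j]
    have hylt : (M - p.2).toNat < g.length := hg ▸ hby
    have hrow : g[(M - p.2).toNat]? = some (g[(M - p.2).toNat]'hylt) := List.getElem?_eq_getElem hylt
    have hrlen : (g[(M - p.2).toNat]'hylt).length = w := hr _ (List.getElem_mem hylt)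
    by_cases ht : ∃ q ∈ t, (M - q.2).toNat = i ∧ (q.1 - m).toNat = j
    · obtain ⟨q, hq, hqc⟩ := ht
      rw [if_pos ⟨q, hq, hqc⟩, if_pos ⟨q, List.mem_cons_of_mem p hq, hqc⟩]
    · rw [if_neg ht]
      by_cases hp : (M - p.2).toNat = i ∧ (p.1 - m).toNat = j
      · rw [if_pos ⟨p, List.mem_cons_self, hp⟩]
        obtain ⟨hpi, hpj⟩ := hp
        subst hpi; subst hpj
        simp only [pvFillStep]
        rw [List.getElem?_set_self (by omega : (M - p.2).toNat < g.length)]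
        rw [Option.getD_some, hrow, Option.getD_some]
        rw [List.getElem?_set_self (by omega : (p.1 - m).toNat < (g[(M - p.2).toNat]'hylt).length)]
      · have hnot : ¬ ∃ q ∈ p :: t, (M - q.2).toNat = i ∧ (q.1 - m).toNat = j := by
          rintro ⟨q, hq, hqc⟩
          rcases List.mem_cons.mp hq with rfl | hq'
          · exact hp hqc
          · exact ht ⟨q, hq', hqc⟩
        rw [if_neg hnot]
        simp only [pvFillStep]
        by_cases hi : (M - p.2).toNat = i
        · subst hi
          rw [List.getElem?_set_self (by omega : (M - p.2).toNat < g.length), Option.getD_some,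
              hrow, Option.getD_some]
          have hj : (p.1 - m).toNat ≠ j := fun hj => hp ⟨rfl, hj⟩
          rw [List.getElem?_set_ne hj]
        · rw [List.getElem?_set_ne hi]

lemma pv_main (positions : List (Int × Int)) :
    env_to_console_matrix_py positions = env_to_console_matrix_py_alt positions := by
  match positions with
  | [] => rfl
  | p :: rest =>
    set m := (rest.map (fun q => q.1)).foldl min p.1 with hm
    set X := (rest.map (fun q => q.1)).foldl max p.1 with hX
    set n := (rest.map (fun q => q.2)).foldl min p.2 with hn
    set M := (rest.map (fun q => q.2)).foldl max p.2 with hM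
    have hA : env_to_console_matrix_py (p :: rest) =
        (p :: rest).foldl (pvFillStep m M)
          ((List.range (M - n + 1).toNat).map (fun _ => (List.range (X - m + 1).toNat).map (fun _ => "0"))) := by
      simp only [env_to_console_matrix_py, if_neg (List.cons_ne_nil p rest), List.map_cons,
        PySem.List.min?_id_cons, PySem.List.max?_id_cons, Option.getD_some]
      rfl
    have hB : env_to_console_matrix_py_alt (p :: rest) =
        (List.range (M - n + 1).toNat).map (fun (gy : Nat) =>
          (List.range (X - m + 1).toNat).map (fun (gx : Nat) =>
            if (m + (gx : Int), M - (gy : Int)) ∈ p :: rest then "1" else "0")) := by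
      simp only [env_to_console_matrix_py_alt, pvExtrema, pvExtrema_eq_aux]
      rfl
    rw [hA, hB]
    -- bounds
    have hbnd : ∀ q ∈ p :: rest, m ≤ q.1 ∧ q.1 ≤ X ∧ n ≤ q.2 ∧ q.2 ≤ M := by
      intro q hq
      rcases List.mem_cons.mp hq with rfl | hq'
      · exact ⟨(PySem.List.foldl_min_le _ _).1, (PySem.List.le_foldl_max _ _).1,
          (PySem.List.foldl_min_le _ _).1, (PySem.List.le_foldl_max _ _).1⟩
      · exact ⟨(PySem.List.foldl_min_le _ _).2 _ (List.mem_map_of_mem hq'),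
          (PySem.List.le_foldl_max _ _).2 _ (List.mem_map_of_mem hq'),
          (PySem.List.foldl_min_le _ _).2 _ (List.mem_map_of_mem hq'),
          (PySem.List.le_foldl_max _ _).2 _ (List.mem_map_of_mem hq')⟩
    set H := (M - n + 1).toNat with hH
    set W := (X - m + 1).toNat with hW
    set g0 := (List.range H).map (fun _ => (List.range W).map (fun _ => "0")) with hg0
    have hg0len : g0.length = H := by simp [hg0]
    have hg0row : ∀ r ∈ g0, r.length = W := by
      intro r hr; simp only [hg0, List.mem_map] at hr; obtain ⟨_, _, rfl⟩ := hr; simp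
    have hpb : ∀ q ∈ p :: rest, (M - q.2).toNat < H ∧ (q.1 - m).toNat < W := by
      intro q hq
      obtain ⟨h1, h2, h3, h4⟩ := hbnd q hq
      constructor <;> omega
    obtain ⟨hFlen, hFrow⟩ := pv_fill_shape m M H W (p :: rest) g0 hg0len hg0row
    apply List.ext_getElem?
    intro i
    by_cases hi : i < H
    · rw [List.getElem?_map, List.getElem?_range hi, Option.map_some,
        List.getElem?_eq_getElem (by omega : i < ((p :: rest).foldl (pvFillStep m M) g0).length)]
      congr 1
      apply List.ext_getElem?
      intro j
      have hcell := pv_fill_cell m M H W (p :: rest) g0 hg0len hg0row hpb i j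
      rw [List.getElem?_eq_getElem (by omega : i < ((p :: rest).foldl (pvFillStep m M) g0).length),
        Option.getD_some] at hcell
      have hcg0 : (g0[i]?.getD [])[j]? = if j < W then some "0" else none := by
        rw [hg0, List.getElem?_map, List.getElem?_range hi, Option.map_some, Option.getD_some,
          List.getElem?_map]
        by_cases hj : j < W
        · rw [List.getElem?_range hj, if_pos hj, Option.map_some]
        · rw [List.getElem?_eq_none (by simp; omega), if_neg hj, Option.map_none]
      rw [hcell, hcg0]
      by_cases hj : j < W
      · rw [List.getElem?_map, List.getElem?_range hj, Option.map_some]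
        have hiff : (∃ q ∈ p :: rest, (M - q.2).toNat = i ∧ (q.1 - m).toNat = j) ↔
            (m + (j : Int), M - (i : Int)) ∈ p :: rest := by
          constructor
          · rintro ⟨q, hq, hq1, hq2⟩
            obtain ⟨b1, b2, b3, b4⟩ := hbnd q hq
            have : (m + (j : Int), M - (i : Int)) = q := by
              obtain ⟨qx, qy⟩ := q
              simp only [Prod.mk.injEq]
              simp only at b1 b2 b3 b4 hq1 hq2
              omega
            rwa [this]
          · intro hmem
            refine ⟨_, hmem, by simp, by simp⟩
        by_cases hmem : (m + (j : Int), M - (i : Int)) ∈ p :: rest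
        · rw [if_pos (hiff.mpr hmem), if_pos hmem]
        · rw [if_neg (fun hx => hmem (hiff.mp hx)), if_neg hmem, if_pos hj]
      · rw [if_neg hj, if_neg (fun ⟨q, hq, _, hq2⟩ => hj (hq2 ▸ (hpb q hq).2)),
          List.getElem?_eq_none (by simp; omega)]
    · rw [List.getElem?_eq_none (by omega), List.getElem?_eq_none (by simp; omega)]

-- ===== VERDICT (by name: the statement is the Claim_ definition above) =====
theorem env_to_console_matrix_py_spec : Claim_equal_env_to_console_matrix_py := by
  intro positions _
  exact pv_main positions
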